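-- pv_equiv track=rewrite | github.com/Hawyuscribe/newreader | django_neurology_mcq/mcq/cognitive_analysis.py | _get_treatment_onsets
-- ===== SOURCE A (Python) =====
-- def _get_treatment_onsets(options: dict) -> list:
--     """Get treatment onset times"""
--     onsets = []
--     for option in options.values():
--         option_lower = option.lower()
--         if 'psychotherapy' in option_lower:
--             onsets.append("2-4 weeks")
--         elif 'propranolol' in option_lower:
--             onsets.append("30-60 min")
--         elif any(drug in option_lower for drug in ['sertraline', 'ssri']):
--             onsets.append("4-6 weeks")
--         else:
--             onsets.append("Variable")
--     return onsets
-- ===== SOURCE B (Python) =====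
-- def _get_treatment_onsets(options: dict) -> list:
--     """Get treatment onset times.
--
--     Rule-major staged passes: start with all 'Variable', then sweep the
--     whole value list once per rule in reverse priority order, overwriting
--     matched positions; the highest-priority rule writes last, so it wins.
--     """
--     values = [v.lower() for v in options.values()]
--     out = ['Variable'] * len(values)
--     for keywords, onset in [
--         (['sertraline', 'ssri'], '4-6 weeks'),
--         (['propranolol'], '30-60 min'),
--         (['psychotherapy'], '2-4 weeks'),
--     ]:
--         for i, lo in enumerate(values):
--             if any(k in lo for k in keywords):
--                 out[i] = onset
--     return out
-- ===== Notes on version B (the rewrite author's own statement) =====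
-- stated objective: alternative
-- what changed: Inverts the loop nesting: instead of classifying each value with an if/elif chain in one value-major pass, B initializes every slot to 'Variable' and makes one full sweep per rule in reverse priority order, overwriting matched positions so the highest-priority rule writes last.
import Mathlib
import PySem

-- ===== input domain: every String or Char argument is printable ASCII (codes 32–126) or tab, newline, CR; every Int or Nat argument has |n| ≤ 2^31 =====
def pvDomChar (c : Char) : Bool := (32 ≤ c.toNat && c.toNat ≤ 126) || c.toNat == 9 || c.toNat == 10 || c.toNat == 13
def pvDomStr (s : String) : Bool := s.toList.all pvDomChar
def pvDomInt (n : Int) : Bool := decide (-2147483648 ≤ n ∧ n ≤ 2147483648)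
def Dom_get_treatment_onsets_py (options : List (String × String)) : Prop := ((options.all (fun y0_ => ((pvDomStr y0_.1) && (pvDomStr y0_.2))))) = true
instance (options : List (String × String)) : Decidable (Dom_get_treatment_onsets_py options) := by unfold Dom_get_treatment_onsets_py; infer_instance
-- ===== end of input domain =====

-- B inverts the loop nesting: it initializes every slot to "Variable" and sweeps the value list once
-- per rule in reverse priority order, overwriting matched positions (objective: alternative).


-- ===== PORT A =====
-- Literal port of A: one fold over the dict's values; if/elif chain appends the onset string.
def get_treatment_onsets_py (options : List (String × String)) : List String :=
  (PySem.Dict.mk options).values.foldl (fun onsets option =>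
    let option_lower := PySem.Str.lower option
    if PySem.Str.isIn "psychotherapy" option_lower then onsets ++ ["2-4 weeks"]
    else if PySem.Str.isIn "propranolol" option_lower then onsets ++ ["30-60 min"]
    else if (["sertraline", "ssri"].any (fun drug => PySem.Str.isIn drug option_lower)) then onsets ++ ["4-6 weeks"]
    else onsets ++ ["Variable"]) []

-- ===== PORT B =====
-- B's inner loop 'for i, lo in enumerate(values): if … : out[i] = onset' walks values and out in
-- lockstep overwriting matched positions; ported exactly as a map over values.zip out.
def pvPass (values : List String) (out : List String) (keywords : List String) (onset : String) : List String :=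
  (values.zip out).map (fun p => if keywords.any (fun k => PySem.Str.isIn k p.1) then onset else p.2)

def get_treatment_onsets_py_alt (options : List (String × String)) : List String :=
  let values := (PySem.Dict.mk options).values.map PySem.Str.lower
  let out0 := values.map (fun _ => "Variable")          -- ['Variable'] * len(values)
  let out1 := pvPass values out0 ["sertraline", "ssri"] "4-6 weeks"
  let out2 := pvPass values out1 ["propranolol"] "30-60 min"
  pvPass values out2 ["psychotherapy"] "2-4 weeks"

-- ===== PRECONDITION & SPEC =====
def Spec_get_treatment_onsets_py (options : List (String × String)) (out : List String) : Prop := out = get_treatment_onsets_py_alt options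
instance (options : List (String × String)) (out : List String) : Decidable (Spec_get_treatment_onsets_py options out) := by unfold Spec_get_treatment_onsets_py; infer_instance

-- ===== CLAIM (what is proved, stated in full; the proofs are below) =====
def Claim_equal_get_treatment_onsets_py : Prop := ∀ (options : List (String × String)), Dom_get_treatment_onsets_py options → Spec_get_treatment_onsets_py options (get_treatment_onsets_py options)

-- ===== LEMMAS AND PROOFS =====
-- A sweep over values paired with a pointwise function of values is again pointwise.
theorem pvPass_map (values : List String) (g : String → String) (kws : List String) (onset : String) :
    pvPass values (values.map g) kws onset
      = values.map (fun v => if kws.any (fun k => PySem.Str.isIn k v) then onset else g v) := by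
  induction values with
  | nil => rfl
  | cons v vs ih => simp only [pvPass, List.map, List.zip_cons_cons] at ih ⊢; rw [ih]

-- A's fold appends, per value, exactly the classification of the lowered value.
theorem pv_fold_eq (vs : List String) (acc : List String) :
    vs.foldl (fun onsets option =>
      let option_lower := PySem.Str.lower option
      if PySem.Str.isIn "psychotherapy" option_lower then onsets ++ ["2-4 weeks"]
      else if PySem.Str.isIn "propranolol" option_lower then onsets ++ ["30-60 min"]
      else if (["sertraline", "ssri"].any (fun drug => PySem.Str.isIn drug option_lower)) then onsets ++ ["4-6 weeks"]
      else onsets ++ ["Variable"]) acc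
    = acc ++ vs.map (fun option =>
        let lo := PySem.Str.lower option
        if PySem.Str.isIn "psychotherapy" lo then "2-4 weeks"
        else if PySem.Str.isIn "propranolol" lo then "30-60 min"
        else if (["sertraline", "ssri"].any (fun drug => PySem.Str.isIn drug lo)) then "4-6 weeks"
        else "Variable") := by
  induction vs generalizing acc with
  | nil => simp
  | cons v vs ih =>
    simp only [List.foldl, List.map]
    rw [ih]
    split_ifs <;> simp

-- ===== VERDICT (by name: the statement is the Claim_ definition above) =====
theorem get_treatment_onsets_py_spec : Claim_equal_get_treatment_onsets_py := by
  intro options _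
  unfold Spec_get_treatment_onsets_py get_treatment_onsets_py get_treatment_onsets_py_alt
  rw [pv_fold_eq]
  simp only [List.nil_append]
  rw [pvPass_map, pvPass_map, pvPass_map, List.map_map]
  apply List.map_congr_left
  intro v _
  simp only [Function.comp]
  split_ifs <;> simp_all
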